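-- pv_equiv track=rewrite | github.com/dkuulis/aoc | 2024/aoc-2024-12.py | find_same_value_regions
-- ===== SOURCE A (Python) =====
-- def find_same_value_regions(matrix):
--     rows, cols = len(matrix), len(matrix[0])
--     visited = [[False] * cols for _ in range(rows)]
--     regions = []
--
--     def dfs(r, c, value, region):
--         if (r < 0 or r >= rows or c < 0 or c >= cols or
--             visited[r][c] or matrix[r][c] != value):
--             return
--         visited[r][c] = True
--         region.append((r, c))
--         for dr, dc in [(-1,0), (1,0), (0,-1), (0,1)]:
--             dfs(r + dr, c + dc, value, region)
--
--     for r in range(rows):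
--         for c in range(cols):
--             if not visited[r][c]:
--                 region = []
--                 dfs(r, c, matrix[r][c], region)
--                 regions.append(region)
--
--     return regions
-- ===== SOURCE B (Python) =====
-- def find_same_value_regions(matrix):
--     rows, cols = len(matrix), len(matrix[0])
--     visited = [[False] * cols for _ in range(rows)]
--     regions = []
--
--     for r in range(rows):
--         for c in range(cols):
--             if visited[r][c]:
--                 continue
--             value = matrix[r][c]
--             region = []
--             stack = [(r, c)]
--             while stack:
--                 cr, cc = stack.pop()
--                 if cr < 0 or cr >= rows or cc < 0 or cc >= cols:
--                     continue
--                 if visited[cr][cc] or matrix[cr][cc] != value: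
--                     continue
--                 visited[cr][cc] = True
--                 region.append((cr, cc))
--                 # push neighbors in reverse of A's direction order so pop
--                 # order matches the recursive pre-order
--                 for dr, dc in ((0, 1), (0, -1), (1, 0), (-1, 0)):
--                     stack.append((cr + dr, cc + dc))
--             regions.append(region)
--
--     return regions
-- ===== Notes on version B (the rewrite author's own statement) =====
-- stated objective: alternative
-- what changed: The recursive dfs helper is replaced by an iterative depth-first search over an explicit stack (visited checked at pop time, the four neighbors pushed in reverse direction order so pop order matches the recursion's pre-order); the outer scan over cells is kept.
import Mathlib
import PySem

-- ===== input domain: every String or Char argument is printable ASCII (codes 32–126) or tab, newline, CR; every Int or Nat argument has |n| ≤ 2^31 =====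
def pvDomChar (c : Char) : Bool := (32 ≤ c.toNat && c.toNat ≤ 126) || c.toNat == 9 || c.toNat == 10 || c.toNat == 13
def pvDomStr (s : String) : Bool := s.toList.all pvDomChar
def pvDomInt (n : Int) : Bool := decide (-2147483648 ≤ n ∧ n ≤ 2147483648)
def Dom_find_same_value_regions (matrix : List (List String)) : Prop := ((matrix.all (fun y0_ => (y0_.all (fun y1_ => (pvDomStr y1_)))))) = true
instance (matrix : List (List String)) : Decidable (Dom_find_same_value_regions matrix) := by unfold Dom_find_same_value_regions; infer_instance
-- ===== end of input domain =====

-- B replaces A's recursive dfs by an explicit-stack iterative DFS (visited checked at pop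
-- time, neighbors pushed in reverse order), same outer scan; objective: alternative.

-- ===== PORT A =====
-- shared helpers for both ports: the visited grid and the matrix cell reads/writes.
-- number of still-unvisited cells (False entries); used only as the termination fuel/measure
def pvCnt (v : List (List Bool)) : Nat := (v.map (fun row => row.count false)).sum

-- visited[r][c]; out-of-grid reads default to true — unreachable behind the bounds guards,
-- kept total only so the ports are total
def pvGetB (v : List (List Bool)) (r c : Int) : Bool :=
  match PySem.List.pyGet? v r with
  | none => true
  | some row => (PySem.List.pyGet? row c).getD true

-- matrix[r][c]; default "" unreachable inside Pre_ behind the bounds guards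
def pvGetS (m : List (List String)) (r c : Int) : String :=
  (PySem.List.pyGet? ((PySem.List.pyGet? m r).getD []) c).getD ""

-- visited[r][c] = True (r, c nonnegative whenever called: the bounds guard precedes)
def pvSet (v : List (List Bool)) (r c : Int) : List (List Bool) :=
  v.modify r.toNat (fun row => row.set c.toNat true)

-- termination facts cited by the ports
lemma count_set_lt (row : List Bool) (j : Nat) (h : row[j]? = some false) :
    (row.set j true).count false < row.count false := by
  induction row generalizing j with
  | nil => simp at h
  | cons b bs ih =>
    cases j with
    | zero =>
      simp at h
      subst h
      simp
    | succ j =>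
      simp at h
      cases b <;> simp <;> exact ih j h

lemma pvCnt_modify_lt (v : List (List Bool)) (i j : Nat) (row : List Bool)
    (hv : v[i]? = some row) (hj : row[j]? = some false) :
    pvCnt (v.modify i (fun r => r.set j true)) < pvCnt v := by
  induction v generalizing i with
  | nil => simp at hv
  | cons x v ih =>
    cases i with
    | zero =>
      simp at hv
      subst hv
      simp only [List.modify_zero_cons, pvCnt, List.map_cons, List.sum_cons]
      exact Nat.add_lt_add_right (count_set_lt _ j hj) _
    | succ i =>
      simp at hv
      simp only [List.modify_succ_cons, pvCnt, List.map_cons, List.sum_cons]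
      exact Nat.add_lt_add_left (ih i hv) _

lemma pvCnt_set_lt (v : List (List Bool)) (r c : Int) (hr : 0 ≤ r) (hc : 0 ≤ c)
    (h : pvGetB v r c = false) : pvCnt (pvSet v r c) < pvCnt v := by
  unfold pvGetB at h
  simp only [PySem.List.pyGet?_of_nonneg _ hr, PySem.List.pyGet?_of_nonneg _ hc] at h
  cases hv : v[r.toNat]? with
  | none => simp [hv] at h
  | some row =>
    simp only [hv] at h
    cases hj : row[c.toNat]? with
    | none => simp [hj] at h
    | some b =>
      simp [hj] at h
      subst h
      exact pvCnt_modify_lt v r.toNat c.toNat row hv hj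

-- A's dfs, with explicit fuel (any fuel > pvCnt of the visited grid gives the fixpoint)
def pvDfsF (matrix : List (List String)) (rows cols : Int) (value : String) :
    Nat → Int → Int → List (List Bool) × List (Int × Int) → List (List Bool) × List (Int × Int)
  | 0, _, _, st => st
  | fuel + 1, r, c, st =>
    if r < 0 ∨ rows ≤ r ∨ c < 0 ∨ cols ≤ c ∨ pvGetB st.1 r c = true ∨ pvGetS matrix r c ≠ value
    then st
    else
      [((-1 : Int), (0 : Int)), (1, 0), (0, -1), (0, 1)].foldl
        (fun s d => pvDfsF matrix rows cols value fuel (r + d.1) (c + d.2) s)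
        (pvSet st.1 r c, st.2 ++ [(r, c)])

def pvDfs (matrix : List (List String)) (rows cols : Int) (value : String) (r c : Int)
    (st : List (List Bool) × List (Int × Int)) : List (List Bool) × List (Int × Int) :=
  pvDfsF matrix rows cols value (pvCnt st.1 + 1) r c st

def find_same_value_regions (matrix : List (List String)) : List (List (Int × Int)) :=
  let rows : Int := (matrix.length : Int)
  let cols : Int := (((PySem.List.pyGet? matrix 0).getD []).length : Int)
  let fin := (PySem.List.pyRange 0 rows 1).foldl (fun st r =>
      (PySem.List.pyRange 0 cols 1).foldl (fun st2 c =>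
        if pvGetB st2.1 r c = true then st2
        else
          let res := pvDfs matrix rows cols (pvGetS matrix r c) r c (st2.1, [])
          (res.1, st2.2 ++ [res.2])) st)
    (List.replicate rows.toNat (List.replicate cols.toNat false), ([] : List (List (Int × Int))))
  fin.2

-- ===== PORT B =====
-- the while-loop over the explicit stack; Python's stack top (end of the list) is the HEAD
-- of the Lean list, so stack.append(x) is cons and stack.pop() takes the head
def pvStack (matrix : List (List String)) (rows cols : Int) (value : String) :
    List (Int × Int) → List (List Bool) × List (Int × Int) → List (List Bool) × List (Int × Int)
  | [], st => st
  | (r, c) :: rest, st =>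
    if h1 : r < 0 ∨ rows ≤ r ∨ c < 0 ∨ cols ≤ c then
      pvStack matrix rows cols value rest st
    else if h2 : pvGetB st.1 r c = true ∨ pvGetS matrix r c ≠ value then
      pvStack matrix rows cols value rest st
    else
      -- pushes (0,1),(0,-1),(1,0),(-1,0) in Python order = this cons chain, top = (r-1,c)
      pvStack matrix rows cols value ((r + -1, c) :: (r + 1, c) :: (r, c + -1) :: (r, c + 1) :: rest)
        (pvSet st.1 r c, st.2 ++ [(r, c)])
  termination_by stack st => (pvCnt st.1, stack.length)
  decreasing_by
  · exact Prod.Lex.right _ (by simp)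
  · exact Prod.Lex.right _ (by simp)
  · push Not at h1 h2
    exact Prod.Lex.left _ _ (pvCnt_set_lt _ _ _ (by omega) (by omega) (by simpa using h2.1))

def find_same_value_regions_alt (matrix : List (List String)) : List (List (Int × Int)) :=
  let rows : Int := (matrix.length : Int)
  let cols : Int := (((PySem.List.pyGet? matrix 0).getD []).length : Int)
  let fin := (PySem.List.pyRange 0 rows 1).foldl (fun st r =>
      (PySem.List.pyRange 0 cols 1).foldl (fun st2 c =>
        if pvGetB st2.1 r c = true then st2
        else
          let value := pvGetS matrix r c
          let res := pvStack matrix rows cols value [(r, c)] (st2.1, [])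
          (res.1, st2.2 ++ [res.2])) st)
    (List.replicate rows.toNat (List.replicate cols.toNat false), ([] : List (List (Int × Int))))
  fin.2

-- ===== PRECONDITION & SPEC =====
-- Pre_ excludes exactly the inputs where A raises IndexError: the empty matrix
-- (len(matrix[0])) and matrices where some row is shorter than the first row
-- (matrix[r][c] with c < cols then fails).
def Pre_find_same_value_regions (matrix : List (List String)) : Prop :=
  matrix ≠ [] ∧ ∀ row ∈ matrix, (matrix.headD []).length ≤ row.length
instance (matrix : List (List String)) : Decidable (Pre_find_same_value_regions matrix) := by
  unfold Pre_find_same_value_regions; infer_instance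

def pvWitness_find_same_value_regions : List (List String) := [["a", "b"], ["b", "b"]]

def Spec_find_same_value_regions (matrix : List (List String)) (out : List (List (Int × Int))) : Prop := out = find_same_value_regions_alt matrix
instance (matrix : List (List String)) (out : List (List (Int × Int))) : Decidable (Spec_find_same_value_regions matrix out) := by unfold Spec_find_same_value_regions; infer_instance

-- ===== CLAIM (what is proved, stated in full; the proofs are below) =====
def Claim_equal_find_same_value_regions : Prop := ∀ (matrix : List (List String)), Dom_find_same_value_regions matrix → Pre_find_same_value_regions matrix → Spec_find_same_value_regions matrix (find_same_value_regions matrix)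

-- ===== LEMMAS AND PROOFS =====

lemma count_set_le (row : List Bool) (j : Nat) :
    (row.set j true).count false ≤ row.count false := by
  induction row generalizing j with
  | nil => simp
  | cons b bs ih =>
    cases j with
    | zero => cases b <;> simp
    | succ j => cases b <;> simp <;> exact ih j

lemma pvCnt_modify_le (v : List (List Bool)) (i j : Nat) :
    pvCnt (v.modify i (fun row => row.set j true)) ≤ pvCnt v := by
  induction v generalizing i with
  | nil => simp
  | cons x v ih =>
    cases i with
    | zero => simp only [List.modify_zero_cons, pvCnt, List.map_cons, List.sum_cons]
              exact Nat.add_le_add_right (count_set_le x j) _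
    | succ i => simp only [List.modify_succ_cons, pvCnt, List.map_cons, List.sum_cons]
                exact Nat.add_le_add_left (ih i) _

lemma pvCnt_set_le (v : List (List Bool)) (r c : Int) : pvCnt (pvSet v r c) ≤ pvCnt v :=
  pvCnt_modify_le v r.toNat c.toNat

lemma dfsF_mono (M : List (List String)) (rows cols : Int) (value : String) :
    ∀ (fuel : Nat) (r c : Int) (st : List (List Bool) × List (Int × Int)),
      pvCnt (pvDfsF M rows cols value fuel r c st).1 ≤ pvCnt st.1 := by
  intro fuel
  induction fuel with
  | zero => intro r c st; simp [pvDfsF]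
  | succ n ih =>
    intro r c st
    rw [pvDfsF]
    split
    · exact le_rfl
    · simp only [List.foldl_cons, List.foldl_nil]
      exact le_trans (ih _ _ _) (le_trans (ih _ _ _) (le_trans (ih _ _ _)
        (le_trans (ih _ _ _) (pvCnt_set_le st.1 r c))))

lemma dfsF_fuel (M : List (List String)) (rows cols : Int) (value : String) :
    ∀ (n f1 f2 : Nat) (r c : Int) (st : List (List Bool) × List (Int × Int)),
      pvCnt st.1 ≤ n → pvCnt st.1 < f1 → pvCnt st.1 < f2 →
      pvDfsF M rows cols value f1 r c st = pvDfsF M rows cols value f2 r c st := by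
  intro n
  induction n with
  | zero =>
    intro f1 f2 r c st hn h1 h2
    obtain ⟨m1, rfl⟩ : ∃ m, f1 = m + 1 := ⟨f1 - 1, by omega⟩
    obtain ⟨m2, rfl⟩ : ∃ m, f2 = m + 1 := ⟨f2 - 1, by omega⟩
    rw [pvDfsF, pvDfsF]
    split
    · rfl
    · rename_i hg
      exfalso
      push Not at hg
      have := pvCnt_set_lt st.1 r c (by omega) (by omega) (by simpa using hg.2.2.2.2.1)
      omega
  | succ n ih =>
    intro f1 f2 r c st hn h1 h2
    obtain ⟨m1, rfl⟩ : ∃ m, f1 = m + 1 := ⟨f1 - 1, by omega⟩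
    obtain ⟨m2, rfl⟩ : ∃ m, f2 = m + 1 := ⟨f2 - 1, by omega⟩
    rw [pvDfsF, pvDfsF]
    split
    · rfl
    · rename_i hg
      push Not at hg
      have hlt : pvCnt (pvSet st.1 r c) < pvCnt st.1 :=
        pvCnt_set_lt st.1 r c (by omega) (by omega) (by simpa using hg.2.2.2.2.1)
      have chain : ∀ (L : List (Int × Int)) (s : List (List Bool) × List (Int × Int)),
          pvCnt s.1 ≤ n → pvCnt s.1 < m1 → pvCnt s.1 < m2 →
          L.foldl (fun t d => pvDfsF M rows cols value m1 (r + d.1) (c + d.2) t) s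
            = L.foldl (fun t d => pvDfsF M rows cols value m2 (r + d.1) (c + d.2) t) s := by
        intro L
        induction L with
        | nil => intro s _ _ _; rfl
        | cons d L ihL =>
          intro s hs hm1 hm2
          simp only [List.foldl_cons]
          rw [ih m1 m2 (r + d.1) (c + d.2) s hs hm1 hm2]
          exact ihL _ (le_trans (dfsF_mono M rows cols value m2 _ _ s) hs)
            ((dfsF_mono M rows cols value m2 _ _ s).trans_lt hm1)
            ((dfsF_mono M rows cols value m2 _ _ s).trans_lt hm2)
      exact chain _ _ (by simpa using (by omega : pvCnt (pvSet st.1 r c) ≤ n))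
        (by simpa using (by omega : pvCnt (pvSet st.1 r c) < m1))
        (by simpa using (by omega : pvCnt (pvSet st.1 r c) < m2))

lemma dfsF_eq_dfs (M : List (List String)) (rows cols : Int) (value : String)
    (f : Nat) (r c : Int) (st : List (List Bool) × List (Int × Int)) (h : pvCnt st.1 < f) :
    pvDfsF M rows cols value f r c st = pvDfs M rows cols value r c st :=
  dfsF_fuel M rows cols value (pvCnt st.1) f (pvCnt st.1 + 1) r c st le_rfl h (by omega)

lemma bridge (M : List (List String)) (rows cols : Int) (value : String) :
    ∀ (n : Nat) (st : List (List Bool) × List (Int × Int)), pvCnt st.1 ≤ n →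
      ∀ (r c : Int) (rest : List (Int × Int)),
      pvStack M rows cols value ((r, c) :: rest) st
        = pvStack M rows cols value rest (pvDfs M rows cols value r c st) := by
  intro n
  induction n with
  | zero =>
    intro st hn r c rest
    unfold pvDfs
    rw [pvStack, pvDfsF]
    by_cases h1 : r < 0 ∨ rows ≤ r ∨ c < 0 ∨ cols ≤ c
    · rw [dif_pos h1, if_pos (by tauto)]
    · rw [dif_neg h1]
      by_cases h2 : pvGetB st.1 r c = true ∨ pvGetS M r c ≠ value
      · rw [dif_pos h2, if_pos (by tauto)]
      · exfalso
        push Not at h1 h2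
        have := pvCnt_set_lt st.1 r c (by omega) (by omega) (by simpa using h2.1)
        omega
  | succ n ih =>
    intro st hn r c rest
    unfold pvDfs
    rw [pvStack, pvDfsF]
    by_cases h1 : r < 0 ∨ rows ≤ r ∨ c < 0 ∨ cols ≤ c
    · rw [dif_pos h1, if_pos (by tauto)]
    · rw [dif_neg h1]
      by_cases h2 : pvGetB st.1 r c = true ∨ pvGetS M r c ≠ value
      · rw [dif_pos h2, if_pos (by tauto)]
      · rw [dif_neg h2, if_neg (by tauto)]
        push Not at h1 h2
        have hlt : pvCnt (pvSet st.1 r c) < pvCnt st.1 :=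
          pvCnt_set_lt st.1 r c (by omega) (by omega) (by simpa using h2.1)
        set s0 : List (List Bool) × List (Int × Int) := (pvSet st.1 r c, st.2 ++ [(r, c)]) with hs0
        have hc0 : pvCnt s0.1 < pvCnt st.1 := hlt
        have hb0 : pvCnt s0.1 ≤ n := by omega
        -- the four pushed neighbors are popped in A's direction order
        rw [ih s0 hb0 (r + -1) c]
        set s1 := pvDfs M rows cols value (r + -1) c s0 with hs1
        have m1 : pvCnt s1.1 ≤ pvCnt s0.1 := dfsF_mono M rows cols value _ _ _ s0
        rw [ih s1 (by omega) (r + 1) c]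
        set s2 := pvDfs M rows cols value (r + 1) c s1 with hs2
        have m2 : pvCnt s2.1 ≤ pvCnt s1.1 := dfsF_mono M rows cols value _ _ _ s1
        rw [ih s2 (by omega) r (c + -1)]
        set s3 := pvDfs M rows cols value r (c + -1) s2 with hs3
        have m3 : pvCnt s3.1 ≤ pvCnt s2.1 := dfsF_mono M rows cols value _ _ _ s2
        rw [ih s3 (by omega) r (c + 1)]
        set s4 := pvDfs M rows cols value r (c + 1) s3 with hs4
        -- now reduce A's foldl over the four directions to the same chain
        simp only [List.foldl_cons, List.foldl_nil, add_zero]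
        rw [dfsF_eq_dfs M rows cols value _ _ _ s0 hc0, ← hs1,
            dfsF_eq_dfs M rows cols value _ _ _ s1 (by omega), ← hs2,
            dfsF_eq_dfs M rows cols value _ _ _ s2 (by omega), ← hs3,
            dfsF_eq_dfs M rows cols value _ _ _ s3 (by omega), ← hs4]

theorem find_same_value_regions_spec : Claim_equal_find_same_value_regions := by
  intro matrix _ _
  unfold Spec_find_same_value_regions find_same_value_regions find_same_value_regions_alt
  have hin : ∀ (rows cols : Int) (st2 : List (List Bool) × List (List (Int × Int))) (r c : Int),
      (if pvGetB st2.1 r c = true then st2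
       else
         let res := pvDfs matrix rows cols (pvGetS matrix r c) r c (st2.1, [])
         (res.1, st2.2 ++ [res.2]))
      = (if pvGetB st2.1 r c = true then st2
         else
           let value := pvGetS matrix r c
           let res := pvStack matrix rows cols value [(r, c)] (st2.1, [])
           (res.1, st2.2 ++ [res.2])) := by
    intro rows cols st2 r c
    by_cases h : pvGetB st2.1 r c = true
    · simp only [if_pos h]
    · simp only [if_neg h]
      have hb := bridge matrix rows cols (pvGetS matrix r c) (pvCnt st2.1)
        (st2.1, ([] : List (Int × Int))) le_rfl r c []
      rw [hb, pvStack]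
  simp only [hin]
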